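-- pv_equiv track=rewrite | github.com/claudio-giovanni/advent-of-code | 2021/10.py | find_corrupt_char
-- ===== SOURCE A (Python) =====
-- from typing import Optional
--
-- CHUNK_RELATION_MAP = {"(": ")", "[": "]", "<": ">", "{": "}"}
--
-- def find_corrupt_char(line: str) -> Optional[str]:
--     """Get the first corrupt char in a line"""
--     expected_closers = []
--     for char in line:
--         if char in CHUNK_RELATION_MAP:  # opener found
--             expected_closers.append(CHUNK_RELATION_MAP[char])
--         elif not expected_closers:  # closer found, when none expected
--             return char
--         elif char != expected_closers.pop():  # closer found, when other expected
--             return char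
-- ===== SOURCE B (Python) =====
-- from typing import Optional
--
-- CHUNK_RELATION_MAP = {"(": ")", "[": "]", "<": ">", "{": "}"}
--
-- def _pass(s):
--     """One left-to-right sweep removing adjacent matched bracket pairs."""
--     out = []
--     i = 0
--     while i < len(s):
--         if i + 1 < len(s) and s[i] in CHUNK_RELATION_MAP and CHUNK_RELATION_MAP[s[i]] == s[i + 1]:
--             i += 2
--         else:
--             out.append(s[i])
--             i += 1
--     return out
--
-- def find_corrupt_char(line: str) -> Optional[str]:
--     """Get the first corrupt char in a line (pair-elimination to a fixpoint)."""
--     s = list(line)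
--     while True:
--         t = _pass(s)
--         if t == s:
--             break
--         s = t
--     for ch in s:
--         if ch not in CHUNK_RELATION_MAP:
--             return ch
--     return None
-- ===== Notes on version B (the rewrite author's own statement) =====
-- stated objective: alternative
-- what changed: Replaces A's single-pass stack scan with repeated sweeps that delete adjacent matched bracket pairs until a fixpoint, then returns the first remaining non-opener character.
import Mathlib
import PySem

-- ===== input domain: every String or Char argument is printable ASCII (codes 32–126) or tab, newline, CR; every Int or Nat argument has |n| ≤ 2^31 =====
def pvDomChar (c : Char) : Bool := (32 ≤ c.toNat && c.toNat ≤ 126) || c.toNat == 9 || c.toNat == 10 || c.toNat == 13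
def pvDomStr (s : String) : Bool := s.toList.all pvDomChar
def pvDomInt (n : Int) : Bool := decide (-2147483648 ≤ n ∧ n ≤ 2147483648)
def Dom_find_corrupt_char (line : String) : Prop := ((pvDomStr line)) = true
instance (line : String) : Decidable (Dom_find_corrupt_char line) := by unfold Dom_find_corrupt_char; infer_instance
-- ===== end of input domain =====

-- B replaces A's one-pass stack scan by repeated elimination of adjacent matched bracket pairs
-- to a fixpoint followed by a scan for the first non-opener (objective: alternative algorithm).

-- shared module constant CHUNK_RELATION_MAP: Python iterates strings into 1-char ASCII strings,
-- ported as Char; key-membership and lookup in the dict become these two functions (exact).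
def isOpener (c : Char) : Bool := c == '(' || c == '[' || c == '<' || c == '{'

def closerOf (c : Char) : Char :=
  if c == '(' then ')' else if c == '[' then ']' else if c == '<' then '>' else '}'

-- ===== PORT A =====
-- A's for-loop with the `expected_closers` stack (Python list append/pop at the end = cons/head here)
def loopA : List Char → List Char → Option String
  | [], _ => none
  | c :: cs, st =>
    if isOpener c then loopA cs (closerOf c :: st)
    else match st with
      | [] => some (String.singleton c)
      | e :: st' => if c ≠ e then some (String.singleton c) else loopA cs st'

def find_corrupt_char (line : String) : Option String := loopA line.toList []

-- ===== PORT B =====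
-- one sweep of Source B's `_pass`: the index loop over s becomes structural recursion on the list
def pass1 : List Char → List Char
  | c :: d :: rest =>
    if isOpener c && closerOf c == d then pass1 rest else c :: pass1 (d :: rest)
  | l => l

theorem pass1_length_le : ∀ s : List Char, (pass1 s).length ≤ s.length := by
  intro s
  induction s using pass1.induct with
  | case1 c d rest h ih =>
    simp only [pass1, h, if_true, List.length_cons]; omega
  | case2 c d rest h ih =>
    have h' : (isOpener c && closerOf c == d) = false := by simpa using h
    have h2 := ih
    simp only [List.length_cons] at h2
    simp only [pass1, h', Bool.false_eq_true, if_false, List.length_cons]; omega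
  | case3 l h =>
    match l, h with
    | [], _ => simp [pass1]
    | [c], _ => simp [pass1]
    | c :: d :: rest, h => exact (h c d rest rfl).elim

theorem pass1_ne_length_lt : ∀ s : List Char, pass1 s ≠ s → (pass1 s).length < s.length := by
  intro s
  induction s using pass1.induct with
  | case1 c d rest h ih =>
    intro _
    have := pass1_length_le rest
    simp only [pass1, h, if_true, List.length_cons]; omega
  | case2 c d rest h ih =>
    intro hne
    have h' : (isOpener c && closerOf c == d) = false := by simpa using h
    simp only [pass1, h', Bool.false_eq_true, if_false] at hne ⊢
    have htail : pass1 (d :: rest) ≠ d :: rest := by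
      intro he; exact hne (by rw [he])
    have h2 := ih htail
    simp only [List.length_cons] at h2 ⊢; omega
  | case3 l h =>
    match l, h with
    | [], _ => intro hne; exact absurd rfl hne
    | [c], _ => intro hne; exact absurd rfl hne
    | c :: d :: rest, h => exact (h c d rest rfl).elim

-- Source B's `while True` loop: sweep until the sweep changes nothing
def reduceFix (s : List Char) : List Char :=
  if h : pass1 s = s then s else reduceFix (pass1 s)
termination_by s.length
decreasing_by exact pass1_ne_length_lt s h

-- Source B's final for-loop: first char that is not an opener
def firstNonOpener : List Char → Option String
  | [] => none
  | c :: cs => if isOpener c then firstNonOpener cs else some (String.singleton c)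

def find_corrupt_char_alt (line : String) : Option String := firstNonOpener (reduceFix line.toList)

-- ===== PRECONDITION & SPEC =====
def Spec_find_corrupt_char (line : String) (out : Option String) : Prop := out = find_corrupt_char_alt line
instance (line : String) (out : Option String) : Decidable (Spec_find_corrupt_char line out) := by unfold Spec_find_corrupt_char; infer_instance

-- ===== CLAIM (what is proved, stated in full; the proofs are below) =====
def Claim_equal_find_corrupt_char : Prop := ∀ (line : String), Dom_find_corrupt_char line → Spec_find_corrupt_char line (find_corrupt_char line)

-- ===== LEMMAS AND PROOFS =====

-- a string with no adjacent matched pair (the fixpoints of pass1)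
def noPair : List Char → Bool
  | c :: d :: rest => !(isOpener c && closerOf c == d) && noPair (d :: rest)
  | _ => true

theorem closerOf_not_opener {c : Char} (h : isOpener c = true) :
    isOpener (closerOf c) = false := by
  simp only [isOpener, Bool.or_eq_true, beq_iff_eq] at h
  rcases h with ((h | h) | h) | h <;> subst h <;> decide

theorem pass1_fix_noPair : ∀ s : List Char, pass1 s = s → noPair s = true := by
  intro s
  induction s using pass1.induct with
  | case1 c d rest h ih =>
    intro hfix
    exfalso
    simp only [pass1, h, if_true] at hfix
    have h1 := pass1_length_le rest
    have : (pass1 rest).length = rest.length + 2 := by rw [hfix]; simp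
    omega
  | case2 c d rest h ih =>
    intro hfix
    have h' : (isOpener c && closerOf c == d) = false := by simpa using h
    simp only [pass1, h', Bool.false_eq_true, if_false, List.cons.injEq, true_and] at hfix
    simp only [noPair, h', Bool.not_false, Bool.true_and]
    exact ih hfix
  | case3 l h =>
    match l, h with
    | [], _ => intro _; rfl
    | [c], _ => intro _; rfl
    | c :: d :: rest, h => exact (h c d rest rfl).elim

theorem reduceFix_noPair : ∀ s : List Char, noPair (reduceFix s) = true := by
  intro s
  induction s using reduceFix.induct with
  | case1 s h => rw [reduceFix]; rw [dif_pos h]; exact pass1_fix_noPair s h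
  | case2 s h ih => rw [reduceFix]; rw [dif_neg h]; exact ih

theorem loopA_pass1 : ∀ (s : List Char) (st : List Char), loopA (pass1 s) st = loopA s st := by
  intro s
  induction s using pass1.induct with
  | case1 c d rest h ih =>
    intro st
    have hc : isOpener c = true := by
      simp only [Bool.and_eq_true] at h; exact h.1
    have hd : closerOf c = d := by
      simp only [Bool.and_eq_true, beq_iff_eq] at h; exact h.2
    subst hd
    have hdno : isOpener (closerOf c) = false := closerOf_not_opener hc
    simp only [pass1, h, if_true]
    rw [ih st]
    show loopA rest st = loopA (c :: closerOf c :: rest) st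
    simp [loopA, hc, hdno]
  | case2 c d rest h ih =>
    intro st
    have h' : (isOpener c && closerOf c == d) = false := by simpa using h
    simp only [pass1, h', Bool.false_eq_true, if_false]
    by_cases hc : isOpener c = true
    · simp only [loopA, hc, if_true]
      exact ih _
    · have hc' : isOpener c = false := by simpa using hc
      cases st with
      | nil => simp [loopA, hc']
      | cons e st' =>
        by_cases hce : c = e
        · subst hce
          simp only [loopA, hc', Bool.false_eq_true, if_false, ne_eq, not_true_eq_false]
          exact ih st'
        · simp [loopA, hc', hce]
  | case3 l h =>
    match l, h with
    | [], _ => intro st; rfl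
    | [c], _ => intro st; rfl
    | c :: d :: rest, h => exact (h c d rest rfl).elim

theorem loopA_reduceFix : ∀ (s : List Char) (st : List Char), loopA (reduceFix s) st = loopA s st := by
  intro s
  induction s using reduceFix.induct with
  | case1 s h => intro st; rw [reduceFix, dif_pos h]
  | case2 s h ih =>
    intro st
    rw [reduceFix, dif_neg h, ih st, loopA_pass1]

-- on a pair-free string whose head can never match the stack top, A's scan returns the first non-opener
theorem loopA_noPair : ∀ (r : List Char) (st : List Char), noPair r = true →
    (∀ e st' c cs, st = e :: st' → r = c :: cs → isOpener c = false → c ≠ e) →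
    loopA r st = firstNonOpener r := by
  intro r
  induction r with
  | nil => intro st _ _; cases st <;> rfl
  | cons c cs ih =>
    intro st hnp hhead
    by_cases hc : isOpener c = true
    · simp only [loopA, hc, if_true, firstNonOpener]
      have hnp' : noPair cs = true := by
        cases cs with
        | nil => rfl
        | cons d rest => simp only [noPair, Bool.and_eq_true] at hnp; exact hnp.2
      refine ih _ hnp' ?_
      rintro e st' c' cs' he hcs hc'
      injection he with he1 _
      subst he1 hcs
      simp only [noPair, Bool.and_eq_true, Bool.not_eq_true', Bool.and_eq_false_iff] at hnp
      rcases hnp.1 with h1 | h1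
      · rw [hc] at h1; exact absurd h1 (by simp)
      · intro hce; rw [hce] at h1; simp at h1
    · have hc' : isOpener c = false := by simpa using hc
      cases st with
      | nil => simp [loopA, firstNonOpener, hc']
      | cons e st' =>
        have : c ≠ e := hhead e st' c cs rfl rfl hc'
        simp [loopA, firstNonOpener, hc', this]

-- ===== VERDICT (by name: the statement is the Claim_ definition above) =====
theorem find_corrupt_char_spec : Claim_equal_find_corrupt_char := by
  intro line _
  show find_corrupt_char line = find_corrupt_char_alt line
  unfold find_corrupt_char find_corrupt_char_alt
  rw [← loopA_reduceFix]
  exact loopA_noPair _ _ (reduceFix_noPair _) (by rintro e st' c cs h - -; cases h)
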